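-- pv_equiv track=rewrite | github.com/i-deal/CMPSC132 | HW1.py | unique_largest
-- ===== SOURCE A (Python) =====
-- def unique_largest(num):
--     """
--         >>> unique_largest(123132)
--         False
--         >>> unique_largest(7264578364)
--         True
--         >>> unique_largest(2)
--         True
--         >>> unique_largest(444444)
--         False
--     """
--     #- YOUR CODE STARTS HERE
--     num1=num
--     largest=0
--     count=0
--     while num1 > 0: # find the largest digit
--         if num1%10>largest:
--             largest=num1%10
--         num1=num1//10
--
--     while num > 0: # check how many times the largest digit is repeated
--         if num%10==largest:
--             count+=1
--         num=num//10
--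
--     if count>1:
--         return False
--     return True
-- ===== SOURCE B (Python) =====
-- def unique_largest(num):
--     # one pass: track the largest digit seen so far and how often it occurred
--     m = 0
--     c = 0
--     n = num
--     while n > 0:
--         d = n % 10
--         if d > m:
--             m = d
--             c = 1
--         elif d == m:
--             c += 1
--         n //= 10
--     return c <= 1
-- ===== Notes on version B (the rewrite author's own statement) =====
-- stated objective: alternative
-- what changed: Replaces A's two digit-extraction loops (one to find the largest digit, a second to count it) with a single loop that maintains the running maximum digit together with its occurrence count, resetting the count when a new maximum appears.
import Mathlib
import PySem

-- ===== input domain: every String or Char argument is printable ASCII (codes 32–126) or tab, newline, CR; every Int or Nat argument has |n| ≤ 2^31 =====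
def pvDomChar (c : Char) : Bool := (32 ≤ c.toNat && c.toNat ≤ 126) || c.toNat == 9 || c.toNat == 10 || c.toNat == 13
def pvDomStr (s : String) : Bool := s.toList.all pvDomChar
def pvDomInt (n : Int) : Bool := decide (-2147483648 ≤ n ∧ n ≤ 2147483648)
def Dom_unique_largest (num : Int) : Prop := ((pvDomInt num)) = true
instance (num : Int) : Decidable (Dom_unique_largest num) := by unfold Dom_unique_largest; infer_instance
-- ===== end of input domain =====

-- B replaces A's two digit loops (find largest, then count it) by one loop keeping (max digit, its count).


theorem pv_fdiv10_lt (n : Int) (_h : 0 < n) : (PySem.Int.floordiv n 10).toNat < n.toNat := by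
  rw [PySem.Int.floordiv_eq_ediv_of_pos (by omega)]
  omega

-- ===== PORT A =====
-- first while loop of A: find the largest digit
def ulLoop1 (num1 largest : Int) : Int :=
  if h : num1 > 0 then
    ulLoop1 (PySem.Int.floordiv num1 10)
      (if PySem.Int.mod num1 10 > largest then PySem.Int.mod num1 10 else largest)
  else largest
termination_by num1.toNat
decreasing_by exact pv_fdiv10_lt _ h

-- second while loop of A: count occurrences of the largest digit
def ulLoop2 (num largest count : Int) : Int :=
  if h : num > 0 then
    ulLoop2 (PySem.Int.floordiv num 10) largest
      (if PySem.Int.mod num 10 = largest then count + 1 else count)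
  else count
termination_by num.toNat
decreasing_by exact pv_fdiv10_lt _ h

def unique_largest (num : Int) : Bool :=
  let largest := ulLoop1 num 0
  let count := ulLoop2 num largest 0
  if count > 1 then false else true

-- ===== PORT B =====
-- B's single while loop: state (m, c) = running maximum digit and its count
def ulScan (n m c : Int) : Int × Int :=
  if h : n > 0 then
    let d := PySem.Int.mod n 10
    if d > m then ulScan (PySem.Int.floordiv n 10) d 1
    else if d = m then ulScan (PySem.Int.floordiv n 10) m (c + 1)
    else ulScan (PySem.Int.floordiv n 10) m c
  else (m, c)
termination_by n.toNat
decreasing_by all_goals exact pv_fdiv10_lt _ h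

def unique_largest_alt (num : Int) : Bool :=
  (ulScan num 0 0).2 ≤ 1

-- ===== PRECONDITION & SPEC =====
def Spec_unique_largest (num : Int) (out : Bool) : Prop := out = unique_largest_alt num
instance (num : Int) (out : Bool) : Decidable (Spec_unique_largest num out) := by unfold Spec_unique_largest; infer_instance

-- ===== CLAIM (what is proved, stated in full; the proofs are below) =====
def Claim_equal_unique_largest : Prop := ∀ (num : Int), Dom_unique_largest num → Spec_unique_largest num (unique_largest num)

-- ===== LEMMAS AND PROOFS =====

theorem ulLoop1_pos (n m : Int) (h : n > 0) :
    ulLoop1 n m = ulLoop1 (PySem.Int.floordiv n 10)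
      (if PySem.Int.mod n 10 > m then PySem.Int.mod n 10 else m) := by
  conv_lhs => rw [ulLoop1]
  rw [dif_pos h]

theorem ulLoop1_neg (n m : Int) (h : ¬ n > 0) : ulLoop1 n m = m := by
  conv_lhs => rw [ulLoop1]
  rw [dif_neg h]

theorem ulLoop2_pos (n d c : Int) (h : n > 0) :
    ulLoop2 n d c = ulLoop2 (PySem.Int.floordiv n 10) d
      (if PySem.Int.mod n 10 = d then c + 1 else c) := by
  conv_lhs => rw [ulLoop2]
  rw [dif_pos h]

theorem ulLoop2_neg (n d c : Int) (h : ¬ n > 0) : ulLoop2 n d c = c := by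
  conv_lhs => rw [ulLoop2]
  rw [dif_neg h]

theorem ulScan_neg (n m c : Int) (h : ¬ n > 0) : ulScan n m c = (m, c) := by
  conv_lhs => rw [ulScan]
  rw [dif_neg h]

theorem ulLoop1_ge_aux (k : Nat) : ∀ (n m : Int), n.toNat ≤ k → m ≤ ulLoop1 n m := by
  induction k with
  | zero => intro n m hk; rw [ulLoop1_neg n m (by omega)]
  | succ k ih =>
    intro n m hk
    by_cases h : n > 0
    · have hlt := pv_fdiv10_lt n h
      rw [ulLoop1_pos n m h]
      have h2 := ih (PySem.Int.floordiv n 10)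
        (if PySem.Int.mod n 10 > m then PySem.Int.mod n 10 else m) (by omega)
      by_cases hmd : PySem.Int.mod n 10 > m
      · rw [if_pos hmd] at h2 ⊢; exact le_trans (by omega) h2
      · rw [if_neg hmd] at h2 ⊢; exact h2
    · rw [ulLoop1_neg n m h]

theorem ulLoop1_ge (n m : Int) : m ≤ ulLoop1 n m := ulLoop1_ge_aux n.toNat n m (le_refl _)

theorem ulLoop2_shift_aux (k : Nat) : ∀ (n d c : Int), n.toNat ≤ k →
    ulLoop2 n d c = c + ulLoop2 n d 0 := by
  induction k with
  | zero => intro n d c hk; rw [ulLoop2_neg n d c (by omega), ulLoop2_neg n d 0 (by omega)]; ring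
  | succ k ih =>
    intro n d c hk
    by_cases h : n > 0
    · have hlt := pv_fdiv10_lt n h
      rw [ulLoop2_pos n d c h, ulLoop2_pos n d 0 h,
          ih (PySem.Int.floordiv n 10) d _ (by omega),
          ih (PySem.Int.floordiv n 10) d (if PySem.Int.mod n 10 = d then 0 + 1 else 0) (by omega)]
      split <;> ring
    · rw [ulLoop2_neg n d c h, ulLoop2_neg n d 0 h]; ring

theorem ulLoop2_shift (n d c : Int) : ulLoop2 n d c = c + ulLoop2 n d 0 :=
  ulLoop2_shift_aux n.toNat n d c (le_refl _)

theorem ulScan_eq_aux (k : Nat) : ∀ (n m c : Int), n.toNat ≤ k →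
    ulScan n m c =
      (ulLoop1 n m, (if ulLoop1 n m = m then c else 0) + ulLoop2 n (ulLoop1 n m) 0) := by
  induction k with
  | zero =>
    intro n m c hk
    rw [ulScan_neg n m c (by omega), ulLoop1_neg n m (by omega),
        ulLoop2_neg n m 0 (by omega), if_pos rfl]
    simp
  | succ k ih =>
    intro n m c hk
    by_cases h : n > 0
    · have hlt := pv_fdiv10_lt n h
      conv_lhs => rw [ulScan]
      rw [dif_pos h]
      simp only []
      set d := PySem.Int.mod n 10 with hdif
      set n' := PySem.Int.floordiv n 10 with hn'
      by_cases hd : d > m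
      · -- new maximum digit
        have hL : ulLoop1 n m = ulLoop1 n' d := by rw [ulLoop1_pos n m h, if_pos hd]
        have hge := ulLoop1_ge n' d
        rw [if_pos hd, ih n' d 1 (by omega), hL, if_neg (by omega : ¬ ulLoop1 n' d = m),
            ulLoop2_pos n (ulLoop1 n' d) 0 h]
        simp only [← hn', ← hdif]
        rw [ulLoop2_shift n' (ulLoop1 n' d) (if d = ulLoop1 n' d then 0 + 1 else 0)]
        by_cases he : d = ulLoop1 n' d
        · rw [if_pos he.symm, if_pos he]
          simp only [Prod.mk.injEq]
          exact ⟨trivial, by ring⟩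
        · rw [if_neg (fun hc => he hc.symm), if_neg he]
          simp only [Prod.mk.injEq]
          exact ⟨trivial, by ring⟩
      · -- d ≤ m: A's running maximum is unchanged
        have hL : ulLoop1 n m = ulLoop1 n' m := by rw [ulLoop1_pos n m h, if_neg hd]
        have hge := ulLoop1_ge n' m
        rw [if_neg hd]
        by_cases he : d = m
        · rw [if_pos he, ih n' m (c + 1) (by omega), hL, ulLoop2_pos n (ulLoop1 n' m) 0 h]
          simp only [← hn', ← hdif]
          rw [ulLoop2_shift n' (ulLoop1 n' m) (if d = ulLoop1 n' m then 0 + 1 else 0)]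
          by_cases hLm : ulLoop1 n' m = m
          · rw [if_pos hLm, if_pos hLm, if_pos (by omega : d = ulLoop1 n' m)]
            simp only [Prod.mk.injEq]
            exact ⟨trivial, by ring⟩
          · rw [if_neg hLm, if_neg hLm, if_neg (by omega : ¬ d = ulLoop1 n' m)]
            simp only [Prod.mk.injEq]
            exact ⟨trivial, by ring⟩
        · rw [if_neg he, ih n' m c (by omega), hL, ulLoop2_pos n (ulLoop1 n' m) 0 h]
          simp only [← hn', ← hdif]
          rw [ulLoop2_shift n' (ulLoop1 n' m) (if d = ulLoop1 n' m then 0 + 1 else 0),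
              if_neg (by omega : ¬ d = ulLoop1 n' m)]
          simp only [Prod.mk.injEq]
          exact ⟨trivial, by ring⟩
    · rw [ulScan_neg n m c h, ulLoop1_neg n m h, ulLoop2_neg n m 0 h, if_pos rfl]
      simp

theorem ulScan_eq (n m c : Int) :
    ulScan n m c =
      (ulLoop1 n m, (if ulLoop1 n m = m then c else 0) + ulLoop2 n (ulLoop1 n m) 0) :=
  ulScan_eq_aux n.toNat n m c (le_refl _)

-- ===== VERDICT (by name: the statement is the Claim_ definition above) =====
theorem unique_largest_spec : Claim_equal_unique_largest := by
  intro num _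
  unfold Spec_unique_largest unique_largest unique_largest_alt
  rw [ulScan_eq]
  by_cases hL : ulLoop1 num 0 = 0
  · rw [hL]; simp only []
    split <;> simp <;> omega
  · rw [if_neg hL]; simp only [zero_add]
    split <;> simp <;> omega
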